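-- pv_equiv track=rewrite | github.com/MateoPierotti/Paradigmas | reales.py | es_real
-- ===== SOURCE A (Python) =====
-- def es_real(lexema):
--     Q0 = 0
--     Q = [0, 1, 2, 3, 4, 5, 6, 7, 8]
--     F = [6, 7]
--
--     estado_actual = Q0
--     indice = 0
--
--     SIGMA = {
--         "DIGITO": 0,
--         "MAS": 1,
--         "MENOS": 2,
--         "PUNTO": 3,
--         "e": 4,
--         "E": 5,
--         "OTRO": 6
--     }
--
--     DELTA = [
--         [2, 1, 1, 3, 8, 8, 8], # transiciones de Q0
--         [2, 8, 8, 3, 8, 8, 8], # transiciones de Q1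
--         [2, 8, 8, 6, 8, 8, 8], # transiciones de Q2
--         [6, 8, 8, 8, 8, 8, 8], # transiciones de Q3
--         [7, 8, 8, 8, 8, 8, 8], # transiciones de Q4
--         [7, 4, 4, 8, 8, 8, 8], # transiciones de Q5
--         [6, 8, 8, 8, 5, 5, 8], # transiciones de Q6
--         [7, 8, 8, 8, 8, 8, 8], # transiciones de Q7
--         [8, 8, 8, 8, 8, 8, 8]  # transiciones de Q8 (estado de rechazo)
--     ]
--
--     def simbolo(caracter):
--         if caracter >= '0' and caracter <= '9':
--             return SIGMA["DIGITO"]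
--
--         elif caracter == '+':
--             return SIGMA["MAS"]
--
--         elif caracter == '-':
--             return SIGMA["MENOS"]
--
--         elif caracter == '.':
--             return SIGMA["PUNTO"]
--
--         elif caracter == 'e':
--             return SIGMA["e"]
--
--         elif caracter == 'E':
--             return SIGMA["E"]
--
--         else:
--             return SIGMA["OTRO"]
--
--     while indice < len(lexema) and estado_actual != 8:
--         estado_actual = DELTA[estado_actual][simbolo(lexema[indice])]
--
--         indice += 1
--
--     return estado_actual in F
-- ===== SOURCE B (Python) =====
-- def es_real(lexema):
--     # grammar-shaped single-pass parser: sign? (digit+ '.' digit* | '.' digit+) ((e|E) sign? digit+)?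
--     i, n = 0, len(lexema)
--     if i < n and lexema[i] in '+-':
--         i += 1
--     d0 = i
--     while i < n and '0' <= lexema[i] <= '9':
--         i += 1
--     if i >= n or lexema[i] != '.':
--         return False
--     i += 1
--     if d0 == i - 1 and not (i < n and '0' <= lexema[i] <= '9'):
--         return False  # dot-first form needs at least one fraction digit
--     while i < n and '0' <= lexema[i] <= '9':
--         i += 1
--     if i == n:
--         return True
--     if lexema[i] not in 'eE':
--         return False
--     i += 1
--     if i < n and lexema[i] in '+-':
--         i += 1
--     if i == n or not ('0' <= lexema[i] <= '9'):
--         return False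
--     while i < n and '0' <= lexema[i] <= '9':
--         i += 1
--     return i == n
-- ===== Notes on version B (the rewrite author's own statement) =====
-- stated objective: alternative
-- what changed: Replaced the generic DFA transition-table loop with a grammar-shaped single-pass parser (sign? (digit+ '.' digit* | '.' digit+) ((e|E) sign? digit+)? consuming the whole string).
import Mathlib
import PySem

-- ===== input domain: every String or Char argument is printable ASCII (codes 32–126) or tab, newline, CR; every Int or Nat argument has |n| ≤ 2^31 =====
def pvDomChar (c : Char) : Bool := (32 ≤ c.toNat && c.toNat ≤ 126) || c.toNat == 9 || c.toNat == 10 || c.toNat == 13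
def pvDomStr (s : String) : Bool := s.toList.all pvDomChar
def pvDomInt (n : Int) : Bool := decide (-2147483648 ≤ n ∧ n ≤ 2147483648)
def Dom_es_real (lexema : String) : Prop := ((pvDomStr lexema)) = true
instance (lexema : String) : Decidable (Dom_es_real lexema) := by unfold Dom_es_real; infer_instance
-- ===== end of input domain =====

-- B replaces A's DFA transition-table loop by a grammar-shaped single-pass parser (alternative decomposition, same cost).

-- ===== PORT A =====
def pvSIGMA : Char → Nat := fun c =>
  if '0' ≤ c ∧ c ≤ '9' then 0      -- DIGITO
  else if c = '+' then 1           -- MAS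
  else if c = '-' then 2           -- MENOS
  else if c = '.' then 3           -- PUNTO
  else if c = 'e' then 4
  else if c = 'E' then 5
  else 6                           -- OTRO

def pvDELTA : List (List Nat) :=
  [[2, 1, 1, 3, 8, 8, 8],
   [2, 8, 8, 3, 8, 8, 8],
   [2, 8, 8, 6, 8, 8, 8],
   [6, 8, 8, 8, 8, 8, 8],
   [7, 8, 8, 8, 8, 8, 8],
   [7, 4, 4, 8, 8, 8, 8],
   [6, 8, 8, 8, 5, 5, 8],
   [7, 8, 8, 8, 8, 8, 8],
   [8, 8, 8, 8, 8, 8, 8]]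

-- the while loop: advances while index in range and state ≠ 8
def pvRunA : List Char → Nat → Nat
  | [], s => s
  | c :: cs, s =>
      if s ≠ 8 then pvRunA cs ((pvDELTA.getD s []).getD (pvSIGMA c) 8)
      else s

def es_real (lexema : String) : Bool :=
  [6, 7].contains (pvRunA lexema.toList 0)

-- ===== PORT B =====
def pvIsD (c : Char) : Bool := decide ('0' ≤ c) && decide (c ≤ '9')

-- one of B's `while … digit` loops
def pvSkipD : List Char → List Char
  | [] => []
  | c :: cs => if pvIsD c then pvSkipD cs else c :: cs

-- B's `if i < n and lexema[i] in '+-': i += 1`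
def pvDropSign : List Char → List Char
  | [] => []
  | c :: cs => if c = '+' || c = '-' then cs else c :: cs

-- B's tail after the mantissa: end of string, or (e|E) sign? digit+ to the end
def pvExpoOk : List Char → Bool
  | [] => true
  | c :: r =>
      if c = 'e' || c = 'E' then
        match pvDropSign r with
        | d :: r' => pvIsD d && (pvSkipD (d :: r') == ([] : List Char))
        | [] => false
      else false

def es_real_alt (lexema : String) : Bool :=
  let cs1 := pvDropSign lexema.toList
  let r1 := pvSkipD cs1
  match r1 with
  | '.' :: r2 =>
      if cs1 == r1 && !(match r2 with | d :: _ => pvIsD d | [] => false) then false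
      else pvExpoOk (pvSkipD r2)
  | _ => false

-- ===== PRECONDITION & SPEC =====
def Spec_es_real (lexema : String) (out : Bool) : Prop := out = es_real_alt lexema
instance (lexema : String) (out : Bool) : Decidable (Spec_es_real lexema out) := by unfold Spec_es_real; infer_instance

-- ===== CLAIM (what is proved, stated in full; the proofs are below) =====
def Claim_equal_es_real : Prop := ∀ (lexema : String), Dom_es_real lexema → Spec_es_real lexema (es_real lexema)

-- ===== LEMMAS AND PROOFS =====

-- one unfolding of A's while loop
lemma stepA (c : Char) (cs : List Char) (s t : Nat) (hs : s ≠ 8)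
    (ht : (pvDELTA.getD s []).getD (pvSIGMA c) 8 = t) : pvRunA (c :: cs) s = pvRunA cs t := by
  simp only [pvRunA]
  rw [if_pos hs, ht]

lemma simbolo_cases (c : Char) :
    (pvSIGMA c = 0 ∧ pvIsD c = true) ∨
    (pvSIGMA c = 1 ∧ pvIsD c = false ∧ c = '+') ∨
    (pvSIGMA c = 2 ∧ pvIsD c = false ∧ c = '-') ∨
    (pvSIGMA c = 3 ∧ pvIsD c = false ∧ c = '.') ∨
    (pvSIGMA c = 4 ∧ pvIsD c = false ∧ c = 'e') ∨
    (pvSIGMA c = 5 ∧ pvIsD c = false ∧ c = 'E') ∨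
    (pvSIGMA c = 6 ∧ pvIsD c = false ∧ c ≠ '+' ∧ c ≠ '-' ∧ c ≠ '.' ∧ c ≠ 'e' ∧ c ≠ 'E') := by
  unfold pvSIGMA pvIsD
  split_ifs <;> simp_all

lemma run8 (cs : List Char) : pvRunA cs 8 = 8 := by
  induction cs with
  | nil => rfl
  | cons c cs ih => simp [pvRunA]

lemma skipD_cons_digit (c : Char) (cs : List Char) (hd : pvIsD c = true) :
    pvSkipD (c :: cs) = pvSkipD cs := by simp [pvSkipD, hd]

lemma skipD_cons_nondigit (c : Char) (cs : List Char) (hd : pvIsD c = false) :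
    pvSkipD (c :: cs) = c :: cs := by simp [pvSkipD, hd]

lemma skipD_length (cs : List Char) : (pvSkipD cs).length ≤ cs.length := by
  induction cs with
  | nil => simp [pvSkipD]
  | cons c cs ih =>
    simp only [pvSkipD]
    split
    · exact le_trans ih (Nat.le_succ _)
    · simp

-- state 7: accept iff the rest is all digits
lemma run7 (cs : List Char) : [6, 7].contains (pvRunA cs 7) = (pvSkipD cs == ([] : List Char)) := by
  induction cs with
  | nil => decide
  | cons c cs ih =>
    rcases simbolo_cases c with ⟨h0, hd⟩ | ⟨h0, hd, _⟩ | ⟨h0, hd, _⟩ | ⟨h0, hd, _⟩ | ⟨h0, hd, _⟩ | ⟨h0, hd, _⟩ | ⟨h0, hd, _⟩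
    · rw [stepA c cs 7 7 (by decide) (by rw [h0]; rfl), ih, skipD_cons_digit c cs hd]
    all_goals
      rw [stepA c cs 7 8 (by decide) (by rw [h0]; rfl), run8, skipD_cons_nondigit c cs hd]; simp

-- states 4: digit+ to the end
lemma run4 (cs : List Char) : [6, 7].contains (pvRunA cs 4) =
    (match cs with | d :: r' => pvIsD d && (pvSkipD (d :: r') == ([] : List Char)) | [] => false) := by
  cases cs with
  | nil => decide
  | cons c cs =>
    rcases simbolo_cases c with ⟨h0, hd⟩ | ⟨h0, hd, _⟩ | ⟨h0, hd, _⟩ | ⟨h0, hd, _⟩ | ⟨h0, hd, _⟩ | ⟨h0, hd, _⟩ | ⟨h0, hd, _⟩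
    · rw [stepA c cs 4 7 (by decide) (by rw [h0]; rfl), run7]
      simp [hd, skipD_cons_digit c cs hd]
    all_goals
      rw [stepA c cs 4 8 (by decide) (by rw [h0]; rfl), run8]; simp [hd]

-- state 5: sign? digit+ to the end
lemma run5 (cs : List Char) : [6, 7].contains (pvRunA cs 5) =
    (match pvDropSign cs with | d :: r' => pvIsD d && (pvSkipD (d :: r') == ([] : List Char)) | [] => false) := by
  cases cs with
  | nil => decide
  | cons c cs =>
    rcases simbolo_cases c with ⟨h0, hd⟩ | ⟨h0, hd, hc⟩ | ⟨h0, hd, hc⟩ | ⟨h0, hd, hc⟩ | ⟨h0, hd, hc⟩ | ⟨h0, hd, hc⟩ | ⟨h0, hd, hc1, hc2, _⟩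
    · rw [stepA c cs 5 7 (by decide) (by rw [h0]; rfl), run7]
      have : pvDropSign (c :: cs) = c :: cs := by
        have : (c = '+') = False ∧ (c = '-') = False := by
          constructor <;> (by_contra h; simp at h; subst h; simp [pvIsD] at hd)
        simp [pvDropSign, this.1, this.2]
      rw [this]
      simp [hd, skipD_cons_digit c cs hd]
    · subst hc
      rw [stepA '+' cs 5 4 (by decide) (by rw [h0]; rfl), run4]
      simp [pvDropSign]
    · subst hc
      rw [stepA '-' cs 5 4 (by decide) (by rw [h0]; rfl), run4]
      simp [pvDropSign]
    all_goals
      rw [stepA c cs 5 8 (by decide) (by rw [h0]; rfl), run8]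
      first
      | (subst hc; simp [pvDropSign, pvIsD])
      | (rw [show pvDropSign (c :: cs) = c :: cs from by simp [pvDropSign, hc1, hc2]]; simp [hd])

-- state 6: accept iff (after skipping digits) the exponent tail is well-formed
lemma run6 (cs : List Char) : [6, 7].contains (pvRunA cs 6) = pvExpoOk (pvSkipD cs) := by
  induction cs with
  | nil => decide
  | cons c cs ih =>
    rcases simbolo_cases c with ⟨h0, hd⟩ | ⟨h0, hd, hc⟩ | ⟨h0, hd, hc⟩ | ⟨h0, hd, hc⟩ | ⟨h0, hd, hc⟩ | ⟨h0, hd, hc⟩ | ⟨h0, hd, hc1, hc2, hc3, hc4, hc5⟩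
    · rw [stepA c cs 6 6 (by decide) (by rw [h0]; rfl), ih, skipD_cons_digit c cs hd]
    · subst hc
      rw [stepA '+' cs 6 8 (by decide) (by rw [h0]; rfl), run8, skipD_cons_nondigit _ cs hd]
      simp [pvExpoOk]
    · subst hc
      rw [stepA '-' cs 6 8 (by decide) (by rw [h0]; rfl), run8, skipD_cons_nondigit _ cs hd]
      simp [pvExpoOk]
    · subst hc
      rw [stepA '.' cs 6 8 (by decide) (by rw [h0]; rfl), run8, skipD_cons_nondigit _ cs hd]
      simp [pvExpoOk]
    · subst hc
      rw [stepA 'e' cs 6 5 (by decide) (by rw [h0]; rfl), run5, skipD_cons_nondigit _ cs hd]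
      simp [pvExpoOk]
    · subst hc
      rw [stepA 'E' cs 6 5 (by decide) (by rw [h0]; rfl), run5, skipD_cons_nondigit _ cs hd]
      simp [pvExpoOk]
    · rw [stepA c cs 6 8 (by decide) (by rw [h0]; rfl), run8, skipD_cons_nondigit _ cs hd]
      simp [pvExpoOk, hc4, hc5]

-- the '.'-then-state-6 suffix shape shared by states 2 and the B-side match
def pvAfterDot : List Char → Bool
  | '.' :: r2 => pvExpoOk (pvSkipD r2)
  | _ => false

-- state 2: digits seen; accept iff after more digits comes '.' and a good state-6 suffix
lemma run2 (cs : List Char) : [6, 7].contains (pvRunA cs 2) = pvAfterDot (pvSkipD cs) := by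
  induction cs with
  | nil => decide
  | cons c cs ih =>
    rcases simbolo_cases c with ⟨h0, hd⟩ | ⟨h0, hd, hc⟩ | ⟨h0, hd, hc⟩ | ⟨h0, hd, hc⟩ | ⟨h0, hd, hc⟩ | ⟨h0, hd, hc⟩ | ⟨h0, hd, hc1, hc2, hc3, _, _⟩
    · rw [stepA c cs 2 2 (by decide) (by rw [h0]; rfl), ih, skipD_cons_digit c cs hd]
    · subst hc
      rw [stepA '+' cs 2 8 (by decide) (by rw [h0]; rfl), run8, skipD_cons_nondigit _ cs hd]
      simp [pvAfterDot]
    · subst hc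
      rw [stepA '-' cs 2 8 (by decide) (by rw [h0]; rfl), run8, skipD_cons_nondigit _ cs hd]
      simp [pvAfterDot]
    · subst hc
      rw [stepA '.' cs 2 6 (by decide) (by rw [h0]; rfl), run6, skipD_cons_nondigit _ cs hd]
      simp [pvAfterDot]
    · subst hc
      rw [stepA 'e' cs 2 8 (by decide) (by rw [h0]; rfl), run8, skipD_cons_nondigit _ cs hd]
      simp [pvAfterDot]
    · subst hc
      rw [stepA 'E' cs 2 8 (by decide) (by rw [h0]; rfl), run8, skipD_cons_nondigit _ cs hd]
      simp [pvAfterDot]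
    · rw [stepA c cs 2 8 (by decide) (by rw [h0]; rfl), run8, skipD_cons_nondigit _ cs hd]
      simp [pvAfterDot, hc3]

-- state 3: '.' seen first; need a digit, then a good state-6 suffix
lemma run3 (cs : List Char) : [6, 7].contains (pvRunA cs 3) =
    (match cs with | d :: r' => pvIsD d && pvExpoOk (pvSkipD r') | [] => false) := by
  cases cs with
  | nil => decide
  | cons c cs =>
    rcases simbolo_cases c with ⟨h0, hd⟩ | ⟨h0, hd, _⟩ | ⟨h0, hd, _⟩ | ⟨h0, hd, _⟩ | ⟨h0, hd, _⟩ | ⟨h0, hd, _⟩ | ⟨h0, hd, _⟩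
    · rw [stepA c cs 3 6 (by decide) (by rw [h0]; rfl), run6]
      simp [hd]
    all_goals
      rw [stepA c cs 3 8 (by decide) (by rw [h0]; rfl), run8]; simp [hd]

-- B's post-sign body, as a function of the post-sign list (same code as in es_real_alt)
def pvBcore (cs : List Char) : Bool :=
  match pvSkipD cs with
  | '.' :: r2 =>
      if cs == pvSkipD cs && !(match r2 with | d :: _ => pvIsD d | [] => false) then false
      else pvExpoOk (pvSkipD r2)
  | _ => false

lemma bcore_of_shrunk (cs : List Char) (h : (cs == pvSkipD cs) = false) :
    pvBcore cs = pvAfterDot (pvSkipD cs) := by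
  unfold pvBcore pvAfterDot
  split <;> simp [h]

lemma run1 (cs : List Char) : [6, 7].contains (pvRunA cs 1) = pvBcore cs := by
  cases cs with
  | nil => decide
  | cons c cs =>
    rcases simbolo_cases c with ⟨h0, hd⟩ | ⟨h0, hd, hc⟩ | ⟨h0, hd, hc⟩ | ⟨h0, hd, hc⟩ | ⟨h0, hd, hc⟩ | ⟨h0, hd, hc⟩ | ⟨h0, hd, hc1, hc2, hc3, _, _⟩
    · -- digit: state 2; B's "no digits consumed" test is false since pvSkipD shortened the list
      have hne : ((c :: cs) == pvSkipD (c :: cs)) = false := by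
        rw [skipD_cons_digit c cs hd]
        cases h : ((c :: cs) == pvSkipD cs)
        · rfl
        · exfalso
          have hl := congrArg List.length (beq_iff_eq.mp h)
          have := skipD_length cs
          simp at hl
          omega
      rw [stepA c cs 1 2 (by decide) (by rw [h0]; rfl), run2,
          bcore_of_shrunk _ hne, skipD_cons_digit c cs hd]
    · subst hc
      rw [stepA '+' cs 1 8 (by decide) (by rw [h0]; rfl), run8]
      unfold pvBcore
      rw [skipD_cons_nondigit _ cs hd]
      simp
    · subst hc
      rw [stepA '-' cs 1 8 (by decide) (by rw [h0]; rfl), run8]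
      unfold pvBcore
      rw [skipD_cons_nondigit _ cs hd]
      simp
    · -- '.': state 3
      subst hc
      rw [stepA '.' cs 1 3 (by decide) (by rw [h0]; rfl), run3]
      unfold pvBcore
      rw [skipD_cons_nondigit _ cs hd]
      cases cs with
      | nil => decide
      | cons d r' =>
        cases hdd : pvIsD d
        · simp [hdd]
        · simp [hdd, skipD_cons_digit d r' hdd]
    · subst hc
      rw [stepA 'e' cs 1 8 (by decide) (by rw [h0]; rfl), run8]
      unfold pvBcore
      rw [skipD_cons_nondigit _ cs hd]
      simp
    · subst hc
      rw [stepA 'E' cs 1 8 (by decide) (by rw [h0]; rfl), run8]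
      unfold pvBcore
      rw [skipD_cons_nondigit _ cs hd]
      simp
    · rw [stepA c cs 1 8 (by decide) (by rw [h0]; rfl), run8]
      unfold pvBcore
      rw [skipD_cons_nondigit _ cs hd]
      simp [hc3]

-- Q0 and Q1 agree on every non-sign head; a sign head moves Q0 to Q1
lemma run0 (cs : List Char) : [6, 7].contains (pvRunA cs 0) = pvBcore (pvDropSign cs) := by
  cases cs with
  | nil => decide
  | cons c cs =>
    rcases simbolo_cases c with ⟨h0, hd⟩ | ⟨h0, hd, hc⟩ | ⟨h0, hd, hc⟩ | ⟨h0, hd, hc⟩ | ⟨h0, hd, hc⟩ | ⟨h0, hd, hc⟩ | ⟨h0, hd, hc1, hc2, hc3, hc4, hc5⟩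
    · have hsign : pvDropSign (c :: cs) = c :: cs := by
        have h1 : (c = '+') = False := by by_contra h; simp at h; subst h; simp [pvIsD] at hd
        have h2 : (c = '-') = False := by by_contra h; simp at h; subst h; simp [pvIsD] at hd
        simp [pvDropSign, h1, h2]
      rw [stepA c cs 0 2 (by decide) (by rw [h0]; rfl), hsign, ← run1 (c :: cs),
          stepA c cs 1 2 (by decide) (by rw [h0]; rfl)]
    · subst hc
      rw [stepA '+' cs 0 1 (by decide) (by rw [h0]; rfl), run1]
      simp [pvDropSign]
    · subst hc
      rw [stepA '-' cs 0 1 (by decide) (by rw [h0]; rfl), run1]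
      simp [pvDropSign]
    · subst hc
      rw [stepA '.' cs 0 3 (by decide) (by rw [h0]; rfl),
          show pvDropSign ('.' :: cs) = '.' :: cs from by simp [pvDropSign], ← run1 ('.' :: cs),
          stepA '.' cs 1 3 (by decide) (by rw [h0]; rfl)]
    · subst hc
      rw [stepA 'e' cs 0 8 (by decide) (by rw [h0]; rfl), run8]
      unfold pvBcore
      rw [show pvDropSign ('e' :: cs) = 'e' :: cs from by simp [pvDropSign],
          skipD_cons_nondigit _ cs hd]
      simp
    · subst hc
      rw [stepA 'E' cs 0 8 (by decide) (by rw [h0]; rfl), run8]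
      unfold pvBcore
      rw [show pvDropSign ('E' :: cs) = 'E' :: cs from by simp [pvDropSign],
          skipD_cons_nondigit _ cs hd]
      simp
    · have hsign : pvDropSign (c :: cs) = c :: cs := by simp [pvDropSign, hc1, hc2]
      rw [stepA c cs 0 8 (by decide) (by rw [h0]; rfl), run8]
      unfold pvBcore
      rw [hsign, skipD_cons_nondigit _ cs hd]
      simp [hc3]

lemma alt_eq_bcore (lexema : String) : es_real_alt lexema = pvBcore (pvDropSign lexema.toList) := rfl

-- ===== VERDICT (by name: the statement is the Claim_ definition above) =====
theorem es_real_spec : Claim_equal_es_real := by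
  intro lexema _
  unfold Spec_es_real es_real
  rw [alt_eq_bcore, run0]
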